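-- pv_equiv track=rewrite | github.com/Ashwin3290/SAP-Table-migration | DMtool/planner.py | clean_table_name
-- ===== SOURCE A (Python) =====
-- def clean_table_name(table_name):
--     """
--     Clean table name by removing common suffixes like 'Table', 'table', etc.
--
--     Parameters:
--     table_name (str): The table name to clean
--
--     Returns:
--     str: Cleaned table name
--     """
--     if not table_name:
--         return table_name
--
--     suffixes = [" Table", " table", " TABLE", "_Table", "_table", "_TABLE"]
--     cleaned_name = table_name
--
--     for suffix in suffixes:
--         if cleaned_name.endswith(suffix):
--             cleaned_name = cleaned_name[:-len(suffix)]
--             break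
--
--     return cleaned_name
-- ===== SOURCE B (Python) =====
-- def clean_table_name(table_name):
--     if not table_name:
--         return table_name
--     tail = table_name[-6:]
--     if len(table_name) >= 6 and tail[0] in (' ', '_') and tail[1:] in {'Table', 'table', 'TABLE'}:
--         return table_name[:-6]
--     return table_name
-- ===== Notes on version B (the rewrite author's own statement) =====
-- stated objective: idiomatic
-- what changed: B replaces A's loop over six suffix strings (endswith each, strip, break) by one inspection of the last six characters: a separator character (space or underscore) followed by a five-letter word in one of the three accepted casings decides a single slice dropping the last six characters.
import Mathlib
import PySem

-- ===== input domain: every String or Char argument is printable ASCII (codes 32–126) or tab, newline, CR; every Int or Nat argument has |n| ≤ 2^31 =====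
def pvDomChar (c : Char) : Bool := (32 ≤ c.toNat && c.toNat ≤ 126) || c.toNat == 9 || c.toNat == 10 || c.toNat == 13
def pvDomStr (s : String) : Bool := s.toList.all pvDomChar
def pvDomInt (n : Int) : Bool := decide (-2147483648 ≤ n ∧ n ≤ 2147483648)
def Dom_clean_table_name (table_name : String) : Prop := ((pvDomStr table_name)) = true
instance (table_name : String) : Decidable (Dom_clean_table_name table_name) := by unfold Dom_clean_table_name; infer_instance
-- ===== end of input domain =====

-- B replaces A's six-suffix endswith loop by a single inspection of the last six characters (one separator char + one word); objective: idiomatic, no speed claim.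

-- ===== PORT A =====
def pvSuffixes : List String := [" Table", " table", " TABLE", "_Table", "_table", "_TABLE"]

-- the 'for suffix in suffixes: if endswith: strip; break' loop
def pvLoopA (cleaned : String) : List String → String
  | [] => cleaned
  | suf :: rest =>
    if PySem.Str.endswith cleaned suf then
      PySem.Str.slice cleaned none (some (-(PySem.Str.len suf)))
    else pvLoopA cleaned rest

def clean_table_name (table_name : String) : String :=
  if table_name = "" then table_name
  else pvLoopA table_name pvSuffixes

-- ===== PORT B =====
def clean_table_name_alt (table_name : String) : String :=
  if table_name = "" then table_name
  else
    let tail := PySem.Str.slice table_name (some (-6)) none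
    if 6 ≤ PySem.Str.len table_name ∧
        (PySem.Str.pyGet? tail 0 = some ' ' ∨ PySem.Str.pyGet? tail 0 = some '_') ∧
        (PySem.Str.slice tail (some 1) none = "Table" ∨
         PySem.Str.slice tail (some 1) none = "table" ∨
         PySem.Str.slice tail (some 1) none = "TABLE") then
      PySem.Str.slice table_name none (some (-6))
    else table_name

-- ===== PRECONDITION & SPEC =====
def Spec_clean_table_name (table_name : String) (out : String) : Prop := out = clean_table_name_alt table_name
instance (table_name : String) (out : String) : Decidable (Spec_clean_table_name table_name out) := by unfold Spec_clean_table_name; infer_instance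

-- ===== CLAIM (what is proved, stated in full; the proofs are below) =====
def Claim_equal_clean_table_name : Prop := ∀ (table_name : String), Dom_clean_table_name table_name → Spec_clean_table_name table_name (clean_table_name table_name)

-- ===== LEMMAS AND PROOFS =====

-- B's if-condition, named for the proofs
def pvCond (s : String) : Prop :=
  6 ≤ PySem.Str.len s ∧
  (PySem.Str.pyGet? (PySem.Str.slice s (some (-6)) none) 0 = some ' ' ∨
   PySem.Str.pyGet? (PySem.Str.slice s (some (-6)) none) 0 = some '_') ∧
  (PySem.Str.slice (PySem.Str.slice s (some (-6)) none) (some 1) none = "Table" ∨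
   PySem.Str.slice (PySem.Str.slice s (some (-6)) none) (some 1) none = "table" ∨
   PySem.Str.slice (PySem.Str.slice s (some (-6)) none) (some 1) none = "TABLE")

lemma alt_pos (s : String) (hs : ¬ s = "") (h : pvCond s) :
    clean_table_name_alt s = PySem.Str.slice s none (some (-6)) := by
  unfold pvCond at h
  simp only [clean_table_name_alt]
  rw [if_neg hs, if_pos]
  exact h

lemma alt_neg (s : String) (hs : ¬ s = "") (h : ¬ pvCond s) :
    clean_table_name_alt s = s := by
  unfold pvCond at h
  simp only [clean_table_name_alt]
  rw [if_neg hs, if_neg]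
  exact h

-- the last six characters, on the list side
lemma tailL (s : String) :
    PySem.List.slice s.toList (some (-6)) none = s.toList.drop (s.length - 6) := by
  rw [PySem.List.slice_from_neg_ofNat s.toList 6 (by omega)]
  simp

lemma cond_of_suffix (s : String) (c : Char) (w : List Char)
    (hc : c = ' ' ∨ c = '_')
    (hw : w = "Table".toList ∨ w = "table".toList ∨ w = "TABLE".toList)
    (hsuf : (c :: w) <:+ s.toList) : pvCond s := by
  have hwlen : w.length = 5 := by rcases hw with h | h | h <;> subst h <;> rfl
  obtain ⟨pre, hl⟩ := hsuf
  have hlen : s.length = pre.length + 6 := by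
    rw [← String.length_toList, ← hl]; simp [hwlen]
  have htailL : PySem.List.slice s.toList (some (-6)) none = c :: w := by
    rw [tailL, hlen, ← hl]
    simp
  have hwl : (PySem.Str.slice (PySem.Str.slice s (some (-6)) none) (some 1) none).toList = w := by
    simp [PySem.List.slice_from_one, htailL]
  refine ⟨?_, ?_, ?_⟩
  · simp [PySem.Str.len_eq]; omega
  · have h0 : PySem.Str.pyGet? (PySem.Str.slice s (some (-6)) none) 0 = some c := by
      simp [htailL]
    rw [h0]
    rcases hc with h | h <;> simp [h]
  · rcases hw with h | h | h
    · exact Or.inl (String.toList_inj.mp (by rw [hwl, h]))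
    · exact Or.inr (Or.inl (String.toList_inj.mp (by rw [hwl, h])))
    · exact Or.inr (Or.inr (String.toList_inj.mp (by rw [hwl, h])))

lemma suffix_of_cond (s : String) (h : pvCond s) :
    ∃ c w, (c = ' ' ∨ c = '_') ∧
      (w = "Table".toList ∨ w = "table".toList ∨ w = "TABLE".toList) ∧
      (c :: w) <:+ s.toList := by
  obtain ⟨hlen, hc, hw⟩ := h
  have hlen' : 6 ≤ s.length := by
    rw [PySem.Str.len_eq] at hlen; rw [← String.length_toList]; omega
  obtain ⟨c, w, hcw⟩ : ∃ c w, PySem.List.slice s.toList (some (-6)) none = c :: w := by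
    rcases e : PySem.List.slice s.toList (some (-6)) none with _ | ⟨c, w⟩
    · exfalso
      have h6 : (PySem.List.slice s.toList (some (-6)) none).length = 6 := by
        rw [tailL]; simp; omega
      rw [e] at h6; simp at h6
    · exact ⟨c, w, rfl⟩
  have hc' : c = ' ' ∨ c = '_' := by
    have h0 : PySem.Str.pyGet? (PySem.Str.slice s (some (-6)) none) 0 = some c := by
      simp [hcw]
    rcases hc with h | h <;> rw [h0] at h <;> simp at h
    · exact Or.inl h
    · exact Or.inr h
  have hw' : w = "Table".toList ∨ w = "table".toList ∨ w = "TABLE".toList := by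
    have h1 : (PySem.Str.slice (PySem.Str.slice s (some (-6)) none) (some 1) none).toList = w := by
      simp [PySem.List.slice_from_one, hcw]
    rcases hw with h | h | h <;> rw [h] at h1 <;>
      [exact Or.inl h1.symm; exact Or.inr (Or.inl h1.symm); exact Or.inr (Or.inr h1.symm)]
  refine ⟨c, w, hc', hw', ?_⟩
  rw [← hcw, tailL]
  exact List.drop_suffix _ _

lemma endswith_of_cond (s : String) (h : pvCond s) :
    PySem.Str.endswith s " Table" = true ∨ PySem.Str.endswith s " table" = true ∨
    PySem.Str.endswith s " TABLE" = true ∨ PySem.Str.endswith s "_Table" = true ∨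
    PySem.Str.endswith s "_table" = true ∨ PySem.Str.endswith s "_TABLE" = true := by
  obtain ⟨c, w, hc, hw, hsuf⟩ := suffix_of_cond s h
  have he : ∀ (suf : String), suf.toList = c :: w → PySem.Str.endswith s suf = true := by
    intro suf hs
    simp [PySem.Chars.endswith_iff, hs, hsuf]
  rcases hc with hc | hc <;> rcases hw with hw | hw | hw <;> subst hc <;> subst hw
  · exact Or.inl (he " Table" rfl)
  · exact Or.inr (Or.inl (he " table" rfl))
  · exact Or.inr (Or.inr (Or.inl (he " TABLE" rfl)))
  · exact Or.inr (Or.inr (Or.inr (Or.inl (he "_Table" rfl))))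
  · exact Or.inr (Or.inr (Or.inr (Or.inr (Or.inl (he "_table" rfl)))))
  · exact Or.inr (Or.inr (Or.inr (Or.inr (Or.inr (he "_TABLE" rfl)))))

lemma cond_of_endswith (s : String) (suf : String) (c : Char) (w : List Char)
    (hsl : suf.toList = c :: w)
    (hc : c = ' ' ∨ c = '_')
    (hw : w = "Table".toList ∨ w = "table".toList ∨ w = "TABLE".toList)
    (h : PySem.Str.endswith s suf = true) : pvCond s := by
  apply cond_of_suffix s c w hc hw
  rw [← hsl]
  simpa [PySem.Chars.endswith_iff] using h

-- ===== VERDICT (by name: the statement is the Claim_ definition above) =====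
theorem clean_table_name_spec : Claim_equal_clean_table_name := by
  intro s _
  unfold Spec_clean_table_name
  by_cases hs : s = ""
  · simp [clean_table_name, clean_table_name_alt, hs]
  · unfold clean_table_name
    rw [if_neg hs]
    simp only [pvSuffixes, pvLoopA]
    have h6a : PySem.Str.len " Table" = 6 := by decide
    have h6b : PySem.Str.len " table" = 6 := by decide
    have h6c : PySem.Str.len " TABLE" = 6 := by decide
    have h6d : PySem.Str.len "_Table" = 6 := by decide
    have h6e : PySem.Str.len "_table" = 6 := by decide
    have h6f : PySem.Str.len "_TABLE" = 6 := by decide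
    by_cases h1 : PySem.Str.endswith s " Table" = true
    · rw [if_pos h1, alt_pos s hs (cond_of_endswith s " Table" ' ' "Table".toList rfl (Or.inl rfl) (Or.inl rfl) h1), h6a]
    rw [if_neg h1]
    by_cases h2 : PySem.Str.endswith s " table" = true
    · rw [if_pos h2, alt_pos s hs (cond_of_endswith s " table" ' ' "table".toList rfl (Or.inl rfl) (Or.inr (Or.inl rfl)) h2), h6b]
    rw [if_neg h2]
    by_cases h3 : PySem.Str.endswith s " TABLE" = true
    · rw [if_pos h3, alt_pos s hs (cond_of_endswith s " TABLE" ' ' "TABLE".toList rfl (Or.inl rfl) (Or.inr (Or.inr rfl)) h3), h6c]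
    rw [if_neg h3]
    by_cases h4 : PySem.Str.endswith s "_Table" = true
    · rw [if_pos h4, alt_pos s hs (cond_of_endswith s "_Table" '_' "Table".toList rfl (Or.inr rfl) (Or.inl rfl) h4), h6d]
    rw [if_neg h4]
    by_cases h5 : PySem.Str.endswith s "_table" = true
    · rw [if_pos h5, alt_pos s hs (cond_of_endswith s "_table" '_' "table".toList rfl (Or.inr rfl) (Or.inr (Or.inl rfl)) h5), h6e]
    rw [if_neg h5]
    by_cases h6 : PySem.Str.endswith s "_TABLE" = true
    · rw [if_pos h6, alt_pos s hs (cond_of_endswith s "_TABLE" '_' "TABLE".toList rfl (Or.inr rfl) (Or.inr (Or.inr rfl)) h6), h6f]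
    rw [if_neg h6]
    rw [alt_neg s hs]
    intro hcond
    rcases endswith_of_cond s hcond with h | h | h | h | h | h
    exacts [h1 h, h2 h, h3 h, h4 h, h5 h, h6 h]
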